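-- pv_equiv track=rewrite | github.com/mojidev-py/discmoji | discmoji/_types.py | get_msg_flags
-- ===== SOURCE A (Python) =====
-- from enum import Enum, IntEnum
--
-- class MessageFlags(Enum):
--     CROSSPOSTED =1 << 0
--     IS_CROSSPOST = 1 << 1
--     SUPPRESS_EMBEDS = 1 << 2
--     SOURCE_MESSAGE_DELETED = 1 << 3
--     URGENT = 1 << 4
--     HAS_THREAD = 1 << 5
--     EPHEMERAL =	1 << 6
--     LOADING = 1 << 7
--     FAILED_TO_MENTION_SOME_ROLES_IN_THREAD = 1 << 8
--     SUPPRESS_NOTIFICATIONS = 1 << 12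
--     IS_VOICE_MESSAGE = 1 << 13
--
-- def get_msg_flags(input: int):
--     returned = []
--     n = 0
--     for item,value in MessageFlags._member_map_.items():
--         n += 1
--         if input & value.value:
--             returned.append(item.lower().capitalize().replace("_"," "))
--     return returned
-- ===== SOURCE B (Python) =====
-- from enum import Enum, IntEnum
--
-- class MessageFlags(Enum):
--     CROSSPOSTED =1 << 0
--     IS_CROSSPOST = 1 << 1
--     SUPPRESS_EMBEDS = 1 << 2
--     SOURCE_MESSAGE_DELETED = 1 << 3
--     URGENT = 1 << 4
--     HAS_THREAD = 1 << 5
--     EPHEMERAL =	1 << 6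
--     LOADING = 1 << 7
--     FAILED_TO_MENTION_SOME_ROLES_IN_THREAD = 1 << 8
--     SUPPRESS_NOTIFICATIONS = 1 << 12
--     IS_VOICE_MESSAGE = 1 << 13
--
-- # Built once: display name keyed by the flag's bit value, and the union of all flag bits.
-- _NAMES = {m.value: name.lower().capitalize().replace("_", " ")
--           for name, m in MessageFlags._member_map_.items()}
-- _ALL = 0
-- for _m in MessageFlags:
--     _ALL |= _m.value
--
-- def get_msg_flags(input: int):
--     # Keep only valid flag bits, then walk the SET bits of the mask (lowest first),
--     # looking each bit's name up in the table.  Ascending bit extraction matches the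
--     # ascending enum definition order, so the output order is identical to A's.
--     m = input & _ALL
--     out = []
--     while m:
--         b = m & -m          # lowest set bit
--         m ^= b              # clear it
--         out.append(_NAMES[b])
--     return out
-- ===== Notes on version B (the rewrite author's own statement) =====
-- stated objective: alternative
-- what changed: B builds a bit-value-to-display-name dict and the union mask of all flags once at module level; per call it masks the input to valid flag bits and walks only the SET bits with lowest-set-bit extraction (b = m & -m; m ^= b), looking each bit's name up in the dict, instead of A's per-call scan over every enum member that re-derives each display name and AND-tests the input.
import Mathlib
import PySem

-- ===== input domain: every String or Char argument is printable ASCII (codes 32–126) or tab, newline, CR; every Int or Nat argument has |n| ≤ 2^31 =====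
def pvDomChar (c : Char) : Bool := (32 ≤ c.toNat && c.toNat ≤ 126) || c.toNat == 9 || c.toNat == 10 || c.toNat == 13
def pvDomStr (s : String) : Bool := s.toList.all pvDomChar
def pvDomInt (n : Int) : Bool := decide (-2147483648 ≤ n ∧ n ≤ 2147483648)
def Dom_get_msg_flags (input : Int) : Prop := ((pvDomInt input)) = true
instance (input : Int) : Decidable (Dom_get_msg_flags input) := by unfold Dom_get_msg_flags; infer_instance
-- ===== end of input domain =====

-- B replaces A's per-call scan of all enum members (re-deriving each display name and AND-testing
-- the input) by a precomputed bit-value→name table plus a while loop that masks the input to the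
-- valid flag bits and extracts only the SET bits, lowest first (b = m & -m; m ^= b); same return
-- value on every int.

-- ===== PORT A =====
-- str.capitalize() ported by hand (exact on ASCII, the only characters the flag names contain):
-- first character uppercased, the rest lowercased.
def pyCapitalize (s : String) : String :=
  match s.toList with
  | [] => ""
  | c :: cs => String.ofList (PySem.Chars.upperChar c :: PySem.Chars.lower cs)

-- MessageFlags._member_map_.items(): names and values in definition order.
def flagItems : List (String × Int) :=
  [("CROSSPOSTED", 1), ("IS_CROSSPOST", 2), ("SUPPRESS_EMBEDS", 4), ("SOURCE_MESSAGE_DELETED", 8),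
   ("URGENT", 16), ("HAS_THREAD", 32), ("EPHEMERAL", 64), ("LOADING", 128),
   ("FAILED_TO_MENTION_SOME_ROLES_IN_THREAD", 256), ("SUPPRESS_NOTIFICATIONS", 4096), ("IS_VOICE_MESSAGE", 8192)]

def get_msg_flags (input : Int) : List String :=
  (flagItems.foldl (fun (st : List String × Int) p =>
      if PySem.Int.band input p.2 ≠ 0 then
        (st.1 ++ [PySem.Str.replace (pyCapitalize (PySem.Str.lower p.1)) "_" " "], st.2 + 1)
      else (st.1, st.2 + 1)) ([], 0)).1

-- ===== PORT B =====
-- _NAMES: display name keyed by each flag's bit value (built once at module level in Source B).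
def nameTable : PySem.Dict Int String :=
  PySem.Dict.ofList
    [(1, "Crossposted"), (2, "Is crosspost"), (4, "Suppress embeds"), (8, "Source message deleted"),
     (16, "Urgent"), (32, "Has thread"), (64, "Ephemeral"), (128, "Loading"),
     (256, "Failed to mention some roles in thread"), (4096, "Suppress notifications"),
     (8192, "Is voice message")]

-- Source B's while loop: peel the lowest set bit off m until m is 0.  The masked m has at most 14
-- bits, so 14 units of fuel bound the Python loop exactly (the fuel guard only makes the same
-- computation total).  _NAMES[b] always succeeds in Python because m was masked to flag bits;
-- the unreachable none branch contributes nothing.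
def peelBits : Nat → Int → List String
  | 0, _ => []
  | f + 1, m =>
      if m ≠ 0 then
        (match PySem.Dict.get? nameTable (PySem.Int.band m (-m)) with
         | some nm => [nm]
         | none => []) ++ peelBits f (PySem.Int.bxor m (PySem.Int.band m (-m)))
      else []

-- _ALL = 12799: OR of all flag values
def get_msg_flags_alt (input : Int) : List String :=
  peelBits 14 (PySem.Int.band input 12799)

-- ===== PRECONDITION & SPEC =====
def Spec_get_msg_flags (input : Int) (out : List String) : Prop := out = get_msg_flags_alt input
instance (input : Int) (out : List String) : Decidable (Spec_get_msg_flags input out) := by unfold Spec_get_msg_flags; infer_instance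

-- ===== CLAIM (what is proved, stated in full; the proofs are below) =====
def Claim_equal_get_msg_flags : Prop := ∀ (input : Int), Dom_get_msg_flags input → Spec_get_msg_flags input (get_msg_flags input)

-- ===== LEMMAS AND PROOFS =====

-- the common reference value: names of the set flag bits of x, in ascending bit order
def refList (x : Nat) : List String :=
  (if x.testBit 0 then ["Crossposted"] else []) ++
  (if x.testBit 1 then ["Is crosspost"] else []) ++
  (if x.testBit 2 then ["Suppress embeds"] else []) ++
  (if x.testBit 3 then ["Source message deleted"] else []) ++
  (if x.testBit 4 then ["Urgent"] else []) ++
  (if x.testBit 5 then ["Has thread"] else []) ++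
  (if x.testBit 6 then ["Ephemeral"] else []) ++
  (if x.testBit 7 then ["Loading"] else []) ++
  (if x.testBit 8 then ["Failed to mention some roles in thread"] else []) ++
  (if x.testBit 12 then ["Suppress notifications"] else []) ++
  (if x.testBit 13 then ["Is voice message"] else [])

set_option maxRecDepth 4000 in
theorem sub_xor_help : ∀ hi : Nat, hi < 128 → ∀ lo : Nat, lo < 128 →
    16383 - (hi * 128 + lo) = 16383 ^^^ (hi * 128 + lo) := by decide

theorem sub_eq_xor {s : Nat} (hs : s < 16384) : 16383 - s = 16383 ^^^ s := by
  have h := sub_xor_help (s / 128) (by omega) (s % 128) (by omega)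
  have h2 : s / 128 * 128 + s % 128 = s := by omega
  rwa [h2] at h

-- Python's a & (1 << k) is non-zero exactly when bit k of a % 16384 is set (k < 14)
theorem band_testBit (a : Int) (k : Nat) (hk : k < 14) :
    (PySem.Int.band a ((2 ^ k : Nat) : Int) ≠ 0) ↔ (a.emod 16384).toNat.testBit k = true := by
  by_cases ha : 0 ≤ a
  · rw [PySem.Int.band_of_nonneg ha (by positivity)]
    have ha' : ((a.toNat : Int)) = a := Int.toNat_of_nonneg ha
    have he : a.emod 16384 = a % 16384 := rfl
    have hm : (a.emod 16384).toNat = a.toNat % 16384 := by omega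
    rw [hm, show (16384 : Nat) = 2 ^ 14 from by norm_num, Nat.testBit_mod_two_pow,
      Int.toNat_natCast, Nat.and_two_pow]
    simp [hk]
  · have hneg : a < 0 := by omega
    rw [PySem.Int.band.eq_1]
    rw [if_neg (by omega), if_pos (by positivity)]
    have hn' : ((-a - 1).toNat : Int) = -a - 1 := Int.toNat_of_nonneg (by omega)
    set n : Nat := (-a - 1).toNat with hn
    have hs : (n % 16384 : Nat) < 16384 := by omega
    have he : a.emod 16384 = a % 16384 := rfl
    have hm : (a.emod 16384).toNat = 16383 - n % 16384 := by omega
    rw [hm, sub_eq_xor hs, Int.toNat_natCast, Nat.two_pow_and,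
      Nat.testBit_xor, show (16383 : Nat) = 2 ^ 14 - 1 from by norm_num,
      Nat.testBit_two_pow_sub_one,
      show ((n % 16384 : Nat)) = n % 2 ^ 14 from by norm_num, Nat.testBit_mod_two_pow]
    simp [hk]
    have h1 : 1 ≤ 2 ^ k := Nat.one_le_two_pow
    cases hb : n.testBit k <;> simp

-- masking with 12799 only looks at the 14 low bits
theorem and_mask_mod (n : Nat) : n &&& 12799 = (n % 16384) &&& 12799 := by
  apply Nat.eq_of_testBit_eq; intro k
  rw [Nat.testBit_and, Nat.testBit_and, show (16384 : Nat) = 2 ^ 14 from by norm_num,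
    Nat.testBit_mod_two_pow]
  by_cases hk : k < 14
  · simp [hk]
  · have hb : (12799 : Nat).testBit k = false :=
      Nat.testBit_lt_two_pow (by
        calc (12799 : Nat) < 2 ^ 14 := by norm_num
          _ ≤ 2 ^ k := Nat.pow_le_pow_right (by norm_num) (by omega))
    simp [hb, hk]

set_option maxRecDepth 4000 in
theorem neg_mask_help' : ∀ hi : Nat, hi < 128 → ∀ lo : Nat, lo < 128 →
    12799 - (12799 &&& (hi * 128 + lo)) = (16383 - (hi * 128 + lo)) &&& 12799 := by decide

theorem neg_mask_help (s : Nat) (hs : s < 16384) :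
    12799 - (12799 &&& s) = (16383 - s) &&& 12799 := by
  have h := neg_mask_help' (s / 128) (by omega) (s % 128) (by omega)
  have h2 : s / 128 * 128 + s % 128 = s := by omega
  rwa [h2] at h

-- Python's a & 12799 equals (a % 16384) & 12799 on the Nat side, for every int a
theorem band_mask (a : Int) :
    PySem.Int.band a 12799 = (((a.emod 16384).toNat &&& 12799 : Nat) : Int) := by
  by_cases ha : 0 ≤ a
  · rw [PySem.Int.band_of_nonneg ha (by norm_num)]
    have ha' : ((a.toNat : Int)) = a := Int.toNat_of_nonneg ha
    have he : a.emod 16384 = a % 16384 := rfl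
    have hm : (a.emod 16384).toNat = a.toNat % 16384 := by omega
    have h1 : (Int.toNat 12799) = 12799 := rfl
    rw [hm, h1, ← and_mask_mod]
  · rw [PySem.Int.band.eq_1, if_neg (by omega), if_pos (by norm_num)]
    have hn' : ((-a - 1).toNat : Int) = -a - 1 := Int.toNat_of_nonneg (by omega)
    set n : Nat := (-a - 1).toNat with hn
    have he : a.emod 16384 = a % 16384 := rfl
    have hm : (a.emod 16384).toNat = 16383 - n % 16384 := by omega
    have h1 : (Int.toNat 12799) = 12799 := rfl
    rw [hm, h1, Nat.and_comm 12799 n, and_mask_mod n, Nat.and_comm (n % 16384) 12799,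
      neg_mask_help (n % 16384) (by omega)]

-- B's loop on every possible masked value equals refList (by evaluation)
-- proof-only mirror of B's loop that records the extracted bit values instead of the names
def peelVals : Nat → Int → List Int
  | 0, _ => []
  | f + 1, m =>
      if m ≠ 0 then
        PySem.Int.band m (-m) :: peelVals f (PySem.Int.bxor m (PySem.Int.band m (-m)))
      else []

theorem peelBits_eq_filterMap (f : Nat) (m : Int) :
    peelBits f m = (peelVals f m).filterMap (fun b => PySem.Dict.get? nameTable b) := by
  induction f generalizing m with
  | zero => rfl
  | succ f ih =>
      simp only [peelBits, peelVals]
      by_cases h : m ≠ 0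
      · simp only [if_pos h, List.filterMap_cons, ih]
        cases hq : PySem.Dict.get? nameTable (PySem.Int.band m (-m)) <;> simp
      · simp [h]

-- set bit values of x among the flag bits, in ascending order
def refVals (x : Nat) : List Int :=
  (if x.testBit 0 then [1] else []) ++
  (if x.testBit 1 then [2] else []) ++
  (if x.testBit 2 then [4] else []) ++
  (if x.testBit 3 then [8] else []) ++
  (if x.testBit 4 then [16] else []) ++
  (if x.testBit 5 then [32] else []) ++
  (if x.testBit 6 then [64] else []) ++
  (if x.testBit 7 then [128] else []) ++
  (if x.testBit 8 then [256] else []) ++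
  (if x.testBit 12 then [4096] else []) ++
  (if x.testBit 13 then [8192] else [])

set_option maxRecDepth 20000 in
set_option maxHeartbeats 4000000 in
theorem peel_helper : ∀ hi : Nat, hi < 4 → ∀ lo : Nat, lo < 512 →
    peelVals 14 (((hi * 4096 + lo : Nat) : Int)) = refVals (hi * 4096 + lo) := by decide

theorem refVals_names (x : Nat) :
    (refVals x).filterMap (fun b => PySem.Dict.get? nameTable b) = refList x := by
  simp only [refVals, refList, List.filterMap_append,
    apply_ite (List.filterMap (fun b => PySem.Dict.get? nameTable b)), List.filterMap_nil,
    show List.filterMap (fun b => PySem.Dict.get? nameTable b) [(1 : Int)] = ["Crossposted"] from by decide,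
    show List.filterMap (fun b => PySem.Dict.get? nameTable b) [(2 : Int)] = ["Is crosspost"] from by decide,
    show List.filterMap (fun b => PySem.Dict.get? nameTable b) [(4 : Int)] = ["Suppress embeds"] from by decide,
    show List.filterMap (fun b => PySem.Dict.get? nameTable b) [(8 : Int)] = ["Source message deleted"] from by decide,
    show List.filterMap (fun b => PySem.Dict.get? nameTable b) [(16 : Int)] = ["Urgent"] from by decide,
    show List.filterMap (fun b => PySem.Dict.get? nameTable b) [(32 : Int)] = ["Has thread"] from by decide,
    show List.filterMap (fun b => PySem.Dict.get? nameTable b) [(64 : Int)] = ["Ephemeral"] from by decide,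
    show List.filterMap (fun b => PySem.Dict.get? nameTable b) [(128 : Int)] = ["Loading"] from by decide,
    show List.filterMap (fun b => PySem.Dict.get? nameTable b) [(256 : Int)] = ["Failed to mention some roles in thread"] from by decide,
    show List.filterMap (fun b => PySem.Dict.get? nameTable b) [(4096 : Int)] = ["Suppress notifications"] from by decide,
    show List.filterMap (fun b => PySem.Dict.get? nameTable b) [(8192 : Int)] = ["Is voice message"] from by decide]

theorem refList_and_mask (x : Nat) : refList (x &&& 12799) = refList x := by
  unfold refList
  simp only [Nat.testBit_and,
    show Nat.testBit 12799 0 = true from by decide, show Nat.testBit 12799 1 = true from by decide,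
    show Nat.testBit 12799 2 = true from by decide, show Nat.testBit 12799 3 = true from by decide,
    show Nat.testBit 12799 4 = true from by decide, show Nat.testBit 12799 5 = true from by decide,
    show Nat.testBit 12799 6 = true from by decide, show Nat.testBit 12799 7 = true from by decide,
    show Nat.testBit 12799 8 = true from by decide, show Nat.testBit 12799 12 = true from by decide,
    show Nat.testBit 12799 13 = true from by decide, Bool.and_true]

theorem peel_ref (x : Nat) : peelBits 14 (((x &&& 12799 : Nat) : Int)) = refList x := by
  have hsle : x &&& 12799 ≤ 12799 := Nat.and_le_right
  have hmod : (x &&& 12799) % 4096 < 512 := by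
    have h1 : (x &&& 12799) % 4096 = x &&& 12799 &&& 4095 :=
      (Nat.and_two_pow_sub_one_eq_mod (x &&& 12799) 12).symm
    have h2 : x &&& 12799 &&& 4095 = x &&& 511 := by
      rw [Nat.and_assoc, show ((12799 : Nat) &&& 4095) = 511 from by decide]
    have h3 : x &&& 511 = x % 512 := Nat.and_two_pow_sub_one_eq_mod x 9
    omega
  have hdec : x &&& 12799 = (x &&& 12799) / 4096 * 4096 + (x &&& 12799) % 4096 := by omega
  have h := peel_helper ((x &&& 12799) / 4096) (by omega) ((x &&& 12799) % 4096) hmod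
  rw [← hdec] at h
  rw [peelBits_eq_filterMap, h, refVals_names, refList_and_mask]

theorem fm_cons (p : (String × Int) → Bool) (f : (String × Int) → String) (x : String × Int)
    (xs : List (String × Int)) :
    List.map f (List.filter p (x :: xs)) =
      (if p x = true then [f x] else []) ++ List.map f (List.filter p xs) := by
  cases h : p x <;> simp [h]

set_option maxHeartbeats 1600000 in
theorem main_eq (input : Int) : get_msg_flags input = get_msg_flags_alt input := by
  set m := (input.emod 16384).toNat with hmdef
  have hB : get_msg_flags_alt input = refList m := by
    unfold get_msg_flags_alt
    rw [band_mask input]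
    exact peel_ref m
  have t0 : (PySem.Int.band input 1 ≠ 0) ↔ m.testBit 0 = true := by
    have h := band_testBit input 0 (by norm_num)
    rw [show (((2 ^ 0 : Nat) : Int)) = 1 from by norm_num, ← hmdef] at h
    exact h
  have t1 : (PySem.Int.band input 2 ≠ 0) ↔ m.testBit 1 = true := by
    have h := band_testBit input 1 (by norm_num)
    rw [show (((2 ^ 1 : Nat) : Int)) = 2 from by norm_num, ← hmdef] at h
    exact h
  have t2 : (PySem.Int.band input 4 ≠ 0) ↔ m.testBit 2 = true := by
    have h := band_testBit input 2 (by norm_num)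
    rw [show (((2 ^ 2 : Nat) : Int)) = 4 from by norm_num, ← hmdef] at h
    exact h
  have t3 : (PySem.Int.band input 8 ≠ 0) ↔ m.testBit 3 = true := by
    have h := band_testBit input 3 (by norm_num)
    rw [show (((2 ^ 3 : Nat) : Int)) = 8 from by norm_num, ← hmdef] at h
    exact h
  have t4 : (PySem.Int.band input 16 ≠ 0) ↔ m.testBit 4 = true := by
    have h := band_testBit input 4 (by norm_num)
    rw [show (((2 ^ 4 : Nat) : Int)) = 16 from by norm_num, ← hmdef] at h
    exact h
  have t5 : (PySem.Int.band input 32 ≠ 0) ↔ m.testBit 5 = true := by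
    have h := band_testBit input 5 (by norm_num)
    rw [show (((2 ^ 5 : Nat) : Int)) = 32 from by norm_num, ← hmdef] at h
    exact h
  have t6 : (PySem.Int.band input 64 ≠ 0) ↔ m.testBit 6 = true := by
    have h := band_testBit input 6 (by norm_num)
    rw [show (((2 ^ 6 : Nat) : Int)) = 64 from by norm_num, ← hmdef] at h
    exact h
  have t7 : (PySem.Int.band input 128 ≠ 0) ↔ m.testBit 7 = true := by
    have h := band_testBit input 7 (by norm_num)
    rw [show (((2 ^ 7 : Nat) : Int)) = 128 from by norm_num, ← hmdef] at h
    exact h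
  have t8 : (PySem.Int.band input 256 ≠ 0) ↔ m.testBit 8 = true := by
    have h := band_testBit input 8 (by norm_num)
    rw [show (((2 ^ 8 : Nat) : Int)) = 256 from by norm_num, ← hmdef] at h
    exact h
  have t9 : (PySem.Int.band input 4096 ≠ 0) ↔ m.testBit 12 = true := by
    have h := band_testBit input 12 (by norm_num)
    rw [show (((2 ^ 12 : Nat) : Int)) = 4096 from by norm_num, ← hmdef] at h
    exact h
  have t10 : (PySem.Int.band input 8192 ≠ 0) ↔ m.testBit 13 = true := by
    have h := band_testBit input 13 (by norm_num)
    rw [show (((2 ^ 13 : Nat) : Int)) = 8192 from by norm_num, ← hmdef] at h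
    exact h
  have n0 : PySem.Str.replace (pyCapitalize (PySem.Str.lower "CROSSPOSTED")) "_" " " = "Crossposted" := by decide
  have n1 : PySem.Str.replace (pyCapitalize (PySem.Str.lower "IS_CROSSPOST")) "_" " " = "Is crosspost" := by decide
  have n2 : PySem.Str.replace (pyCapitalize (PySem.Str.lower "SUPPRESS_EMBEDS")) "_" " " = "Suppress embeds" := by decide
  have n3 : PySem.Str.replace (pyCapitalize (PySem.Str.lower "SOURCE_MESSAGE_DELETED")) "_" " " = "Source message deleted" := by decide
  have n4 : PySem.Str.replace (pyCapitalize (PySem.Str.lower "URGENT")) "_" " " = "Urgent" := by decide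
  have n5 : PySem.Str.replace (pyCapitalize (PySem.Str.lower "HAS_THREAD")) "_" " " = "Has thread" := by decide
  have n6 : PySem.Str.replace (pyCapitalize (PySem.Str.lower "EPHEMERAL")) "_" " " = "Ephemeral" := by decide
  have n7 : PySem.Str.replace (pyCapitalize (PySem.Str.lower "LOADING")) "_" " " = "Loading" := by decide
  have n8 : PySem.Str.replace (pyCapitalize (PySem.Str.lower "FAILED_TO_MENTION_SOME_ROLES_IN_THREAD")) "_" " " = "Failed to mention some roles in thread" := by decide
  have n9 : PySem.Str.replace (pyCapitalize (PySem.Str.lower "SUPPRESS_NOTIFICATIONS")) "_" " " = "Suppress notifications" := by decide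
  have n10 : PySem.Str.replace (pyCapitalize (PySem.Str.lower "IS_VOICE_MESSAGE")) "_" " " = "Is voice message" := by decide
  have hA : get_msg_flags input = List.map
      (fun p => PySem.Str.replace (pyCapitalize (PySem.Str.lower p.1)) "_" " ")
      (List.filter (fun p => decide (PySem.Int.band input p.2 ≠ 0)) flagItems) := by
    unfold get_msg_flags
    rw [show (fun (st : List String × Int) p =>
        if PySem.Int.band input p.2 ≠ 0 then
          (st.1 ++ [PySem.Str.replace (pyCapitalize (PySem.Str.lower p.1)) "_" " "], st.2 + 1)
        else (st.1, st.2 + 1)) = (fun (st : List String × Int) (p : String × Int) =>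
          ((if decide (PySem.Int.band input p.2 ≠ 0) = true then
              st.1 ++ [PySem.Str.replace (pyCapitalize (PySem.Str.lower p.1)) "_" " "] else st.1),
           st.2 + 1)) from by
        funext st p; by_cases h : PySem.Int.band input p.2 ≠ 0 <;> simp [h]]
    rw [PySem.List.foldl_prod_mk
        (fun (l : List String) (q : String × Int) =>
          if decide (PySem.Int.band input q.2 ≠ 0) = true then
            l ++ [PySem.Str.replace (pyCapitalize (PySem.Str.lower q.1)) "_" " "] else l)
        (fun (n : Int) (_ : String × Int) => n + 1) flagItems [] 0,
      PySem.List.foldl_append_if]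
    simp
  rw [hA, hB]
  simp only [fm_cons, List.filter_nil, List.map_nil, flagItems, List.append_nil,
    decide_eq_true_eq, n0, n1, n2, n3, n4, n5, n6, n7, n8, n9, n10]
  simp only [refList, List.append_assoc, t0, t1, t2, t3, t4, t5, t6, t7, t8, t9, t10]

-- ===== VERDICT (by name: the statement is the Claim_ definition above) =====
theorem get_msg_flags_spec : Claim_equal_get_msg_flags := by
  intro input _
  unfold Spec_get_msg_flags
  exact main_eq input
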